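-- pv_equiv track=rewrite | github.com/cirosantilli/project-euler-solvers | solvers/638.py | gaussian_binom
-- ===== SOURCE A (Python) =====
-- MOD = 1_000_000_007
--
-- def binom_mod(n: int, r: int, mod: int = MOD) -> int:
--     """Compute nCr mod prime mod via multiplicative formula (good for the small n used here)."""
--     if r < 0 or r > n:
--         return 0
--     r = min(r, n - r)
--     if r == 0:
--         return 1
--     num = 1
--     den = 1
--     # num = Π (n-r+1 .. n), den = r!
--     start = n - r
--     for i in range(1, r + 1):
--         num = (num * (start + i)) % mod
--         den = (den * i) % mod
--     return (num * pow(den, mod - 2, mod)) % mod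
--
-- def gaussian_binom(m: int, n: int, q: int, mod: int = MOD) -> int:
--     """Compute Gaussian binomial coefficient [m choose n]_q modulo mod."""
--     if n < 0 or n > m:
--         return 0
--     if n == 0 or n == m:
--         return 1
--
--     q %= mod
--     if q == 1:
--         return binom_mod(m, n, mod)
--
--     n = min(n, m - n)
--     if n == 0:
--         return 1
--
--     b = m - n  # so m-n+i == b+i
--
--     # Products of (1 - q^{b+i}) and (1 - q^i)
--     num_prod = 1
--     den_prod = 1
--
--     qmod = q
--     pow_den = qmod  # q^1
--     pow_num = pow(qmod, b + 1, mod)  # q^{b+1}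
--
--     modp1 = (
--         mod + 1
--     )  # used to keep factors positive: (1 - x) mod mod == (mod+1-x) mod mod
--     for _ in range(n):
--         num_prod = (num_prod * (modp1 - pow_num)) % mod
--         den_prod = (den_prod * (modp1 - pow_den)) % mod
--         pow_den = (pow_den * qmod) % mod
--         pow_num = (pow_num * qmod) % mod
--
--     return (num_prod * pow(den_prod, mod - 2, mod)) % mod
-- ===== SOURCE B (Python) =====
-- MOD = 1_000_000_007
--
-- def gaussian_binom(m: int, n: int, q: int, mod: int = MOD) -> int:
--     """Gaussian binomial [m choose n]_q mod mod, as a single product of fully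
--     reduced ratio factors: each factor (1-q^{b+i})/(1-q^i) (or (b+i)/i when
--     q == 1) is folded into one accumulator with its own Fermat inverse, so
--     there are no numerator/denominator accumulators, no maintained running
--     powers and no final division step; powers come from pow(q, k, mod)."""
--     if n < 0 or n > m:
--         return 0
--     if n == 0 or n == m:
--         return 1
--     q %= mod
--     r = min(n, m - n)
--     b = m - r
--     acc = 1
--     if q == 1:
--         for i in range(1, r + 1):
--             acc = acc * (b + i) % mod * pow(i, mod - 2, mod) % mod
--     else:
--         for i in range(1, r + 1):
--             acc = acc * (1 - pow(q, b + i, mod)) % mod \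
--                   * pow(1 - pow(q, i, mod), mod - 2, mod) % mod
--     return acc % mod
-- ===== Notes on version B (the rewrite author's own statement) =====
-- stated objective: alternative
-- what changed: B replaces A's two-accumulator scheme (separate numerator/denominator products with incrementally maintained running powers and one final Fermat division) by a single-accumulator product of fully reduced ratio factors: each factor (1-q^{b+i})/(1-q^i) (or (b+i)/i when q==1, dropping the binom_mod helper) is folded in with its own per-factor Fermat inverse and powers recomputed by pow(q,k,mod), so there is no final inverse step; exact because (xy)^(mod-2) = x^(mod-2) y^(mod-2) mod mod for any mod.
-- outside the precondition, e.g. on gaussian_binom(5, 2, 3, -7): A returns -2, B returns -2; on gaussian_binom(4, 2, 3, 1): A returns 0, B returns 0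
import Mathlib
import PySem

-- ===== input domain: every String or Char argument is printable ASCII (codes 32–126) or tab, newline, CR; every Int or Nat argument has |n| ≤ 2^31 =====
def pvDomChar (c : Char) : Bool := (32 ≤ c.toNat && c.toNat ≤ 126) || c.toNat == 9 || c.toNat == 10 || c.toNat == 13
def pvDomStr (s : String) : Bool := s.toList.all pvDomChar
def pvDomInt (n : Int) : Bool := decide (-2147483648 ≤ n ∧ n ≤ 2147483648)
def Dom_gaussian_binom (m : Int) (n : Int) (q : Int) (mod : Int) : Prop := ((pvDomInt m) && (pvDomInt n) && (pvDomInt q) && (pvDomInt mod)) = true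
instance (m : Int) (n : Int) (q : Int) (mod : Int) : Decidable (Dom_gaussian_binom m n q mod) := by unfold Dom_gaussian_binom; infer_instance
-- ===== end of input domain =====

-- B folds the ratio factors one at a time, each with its own per-factor Fermat inverse,
-- instead of A's two running products with maintained powers and one final inverse
-- (objective: alternative).

-- ===== PORT A =====
-- Python's built-in pow(b, e, m), ported by hand as binary modular exponentiation so the
-- port evaluates fast on large exponents; exact for m > 0 (lemma pyPowMod_eq below proves
-- it computes b ^ e mod m there)
def pyPowMod (b : Int) (e : Nat) (m : Int) : Int :=
  if e = 0 then PySem.Int.mod 1 m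
  else
    let h := pyPowMod (PySem.Int.mod (b * b) m) (e / 2) m
    if e % 2 = 1 then PySem.Int.mod (h * b) m else h
decreasing_by exact Nat.div_lt_self (Nat.pos_of_ne_zero (by assumption)) (by norm_num)

-- helper of A: binom_mod(n, r, mod); pow(den, mod-2, mod) is ported with a Nat exponent
-- (mod - 2).toNat, exact for mod ≥ 2 (Pre_ restricts to that whenever this line is reached)
def binom_mod (n : Int) (r : Int) (mod : Int) : Int :=
  if r < 0 ∨ n < r then 0
  else
    let r2 := min r (n - r)
    if r2 = 0 then 1
    else
      let start := n - r2
      let st := (PySem.List.pyRange 1 (r2 + 1) 1).foldl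
        (fun (s : Int × Int) i =>
          (PySem.Int.mod (s.1 * (start + i)) mod, PySem.Int.mod (s.2 * i) mod)) (1, 1)
      PySem.Int.mod (st.1 * pyPowMod st.2 (mod - 2).toNat mod) mod

def gaussian_binom (m : Int) (n : Int) (q : Int) (mod : Int) : Int :=
  if n < 0 ∨ m < n then 0
  else if n = 0 ∨ n = m then 1
  else
    let q1 := PySem.Int.mod q mod
    if q1 = 1 then binom_mod m n mod
    else
      let n2 := min n (m - n)
      if n2 = 0 then 1
      else
        let b := m - n2
        let modp1 := mod + 1
        -- pow(qmod, b+1, mod): exponent b+1 ≥ 0 whenever this line is reached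
        let st := (PySem.List.pyRange 0 n2 1).foldl
          (fun (s : Int × Int × Int × Int) _ =>
            (PySem.Int.mod (s.1 * (modp1 - s.2.2.2)) mod,
             PySem.Int.mod (s.2.1 * (modp1 - s.2.2.1)) mod,
             PySem.Int.mod (s.2.2.1 * q1) mod,
             PySem.Int.mod (s.2.2.2 * q1) mod))
          (1, 1, q1, pyPowMod q1 (b + 1).toNat mod)
        PySem.Int.mod (st.1 * pyPowMod st.2.1 (mod - 2).toNat mod) mod

-- ===== PORT B =====
-- exponents mod-2 (reached only with mod ≥ 2 under Pre_), i and b+i (both ≥ 1 here)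
-- are ported with .toNat, exact on those inputs
def gaussian_binom_alt (m : Int) (n : Int) (q : Int) (mod : Int) : Int :=
  if n < 0 ∨ m < n then 0
  else if n = 0 ∨ n = m then 1
  else
    let q1 := PySem.Int.mod q mod
    let r := min n (m - n)
    let b := m - r
    let acc :=
      if q1 = 1 then
        (PySem.List.pyRange 1 (r + 1) 1).foldl
          (fun a i =>
            PySem.Int.mod
              (PySem.Int.mod (a * (b + i)) mod *
                pyPowMod i (mod - 2).toNat mod) mod) 1
      else
        (PySem.List.pyRange 1 (r + 1) 1).foldl
          (fun a i =>
            PySem.Int.mod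
              (PySem.Int.mod (a * (1 - pyPowMod q1 (b + i).toNat mod)) mod *
                pyPowMod (1 - pyPowMod q1 i.toNat mod) (mod - 2).toNat mod) mod) 1
    PySem.Int.mod acc mod

-- ===== PRECONDITION & SPEC =====
-- Pre_ excludes mod ≤ 1 on inputs that reach the modular-inverse step pow(_, mod-2, mod):
-- there A raises (ZeroDivisionError for mod = 0, ValueError for mod < 0 whenever the base
-- shares a factor with mod) or takes Python's negative-exponent inverse path, which the
-- Nat-exponent powMod port cannot express; early-return inputs keep every mod.
def Pre_gaussian_binom (m : Int) (n : Int) (q : Int) (mod : Int) : Prop :=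
  n < 0 ∨ m < n ∨ n = 0 ∨ n = m ∨ 2 ≤ mod
instance (m : Int) (n : Int) (q : Int) (mod : Int) : Decidable (Pre_gaussian_binom m n q mod) := by
  unfold Pre_gaussian_binom; infer_instance

def pvWitness_gaussian_binom : Int × Int × Int × Int := (4, 2, 2, 7)

def Spec_gaussian_binom (m : Int) (n : Int) (q : Int) (mod : Int) (out : Int) : Prop := out = gaussian_binom_alt m n q mod
instance (m : Int) (n : Int) (q : Int) (mod : Int) (out : Int) : Decidable (Spec_gaussian_binom m n q mod out) := by unfold Spec_gaussian_binom; infer_instance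

-- ===== CLAIM (what is proved, stated in full; the proofs are below) =====
def Claim_equal_gaussian_binom : Prop := ∀ (m : Int) (n : Int) (q : Int) (mod : Int), Dom_gaussian_binom m n q mod → Pre_gaussian_binom m n q mod → Spec_gaussian_binom m n q mod (gaussian_binom m n q mod)

-- ===== LEMMAS AND PROOFS =====

-- push an emod through a product on the left factor
theorem pv_mulmod_left (a b M : Int) : (a % M * b) % M = a * b % M := by
  conv_rhs => rw [Int.mul_emod]
  rw [Int.mul_emod]
  simp [Int.emod_emod_of_dvd]

-- binary modular exponentiation computes b ^ e % m (for positive m)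
theorem pyPowMod_eq (b : Int) (e : Nat) (m : Int) (hm : 0 < m) : pyPowMod b e m = b ^ e % m := by
  induction e using Nat.strong_induction_on generalizing b with
  | _ e ih =>
    unfold pyPowMod
    by_cases h0 : e = 0
    · simp [h0, PySem.Int.mod_eq_emod_of_pos hm]
    · rw [if_neg h0]
      have hlt : e / 2 < e := Nat.div_lt_self (Nat.pos_of_ne_zero h0) (by norm_num)
      rw [ih (e / 2) hlt]
      simp only [PySem.Int.mod_eq_emod_of_pos hm]
      have hpe : ((b * b) % m) ^ (e / 2) % m = (b * b) ^ (e / 2) % m :=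
        Int.ModEq.pow _ (Int.emod_emod_of_dvd _ dvd_rfl)
      have hbb : (b * b) ^ (e / 2) = b ^ (2 * (e / 2)) := by rw [pow_mul, sq]
      rw [hpe, hbb]
      by_cases h1 : e % 2 = 1
      · rw [if_pos h1, pv_mulmod_left, ← pow_succ]
        congr 2
        omega
      · rw [if_neg h1]
        congr 2
        omega

theorem pv_pyRange_zero (r : Int) :
    PySem.List.pyRange 0 r 1 = List.map (fun k : Nat => (k : Int)) (List.range r.toNat) := by
  have h : r = ((r.toNat : Nat) : Int) ∨ r ≤ 0 := by omega
  rcases h with h | h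
  · rw [h, PySem.List.pyRange_zero_natCast]
    rfl
  · have h0 : r.toNat = 0 := by omega
    rw [PySem.List.pyRange_of_pos _ _ (by norm_num : (0:Int) < 1)]
    rw [if_neg (by omega), h0]
    rfl

theorem pv_pyRange_one (r : Int) (hr : 0 < r) :
    PySem.List.pyRange 1 (r + 1) 1 = List.map (fun k : Nat => 1 + (k : Int)) (List.range r.toNat) := by
  rw [PySem.List.pyRange_of_pos _ _ (by norm_num : (0:Int) < 1)]
  rw [if_pos (by omega)]
  norm_num

-- a fold with independent pair components splits into two folds
theorem pv_foldl_pair {α : Type} (f g : Int → α → Int) (l : List α) (a b : Int) :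
    l.foldl (fun (s : Int × Int) x => (f s.1 x, g s.2 x)) (a, b) =
      (l.foldl f a, l.foldl g b) := by
  induction l generalizing a b with
  | nil => rfl
  | cons x xs ih => simp [ih]

-- fold of mod-reduced multiplications = product mod M
theorem pv_foldl_mulmod {α : Type} (M c : Int) (f : α → Int) (l : List α) :
    l.foldl (fun a x => (a * f x) % M) (c % M) = c * (l.map f).prod % M := by
  induction l generalizing c with
  | nil => simp
  | cons x xs ih =>
    simp only [List.foldl_cons, List.map_cons, List.prod_cons]
    rw [pv_mulmod_left, ih]
    ring_nf

-- fold with initial 1 (1 % M = 1 for 2 ≤ M)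
theorem pv_foldl_mulmod' {α : Type} (M : Int) (hM : 2 ≤ M) (f : α → Int) (l : List α) :
    l.foldl (fun a x => (a * f x) % M) 1 = (l.map f).prod % M := by
  have h1 : (1:Int) = 1 % M := (Int.emod_eq_of_lt (by norm_num) (by omega)).symm
  rw [h1, pv_foldl_mulmod, one_mul]

-- B's loop shape: two mod-reduced multiplications per step
theorem pv_foldl_mulmod2 {α : Type} (M c : Int) (f g : α → Int) (l : List α) :
    l.foldl (fun a x => (a * f x % M * g x) % M) (c % M) =
      c * (l.map (fun x => f x * g x)).prod % M := by
  induction l generalizing c with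
  | nil => simp
  | cons x xs ih =>
    simp only [List.foldl_cons, List.map_cons, List.prod_cons]
    rw [pv_mulmod_left, mul_assoc, pv_mulmod_left, ih]
    ring_nf

theorem pv_foldl_mulmod2' {α : Type} (M : Int) (hM : 2 ≤ M) (f g : α → Int) (l : List α) :
    l.foldl (fun a x => (a * f x % M * g x) % M) 1 =
      (l.map (fun x => f x * g x)).prod % M := by
  have h1 : (1:Int) = 1 % M := (Int.emod_eq_of_lt (by norm_num) (by omega)).symm
  rw [h1, pv_foldl_mulmod2, one_mul]

-- closed form of A's main loop: running q-powers and mod-reduced partial products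
theorem pv_A_loop (M q1 : Int) (hM : 2 ≤ M) (hq : q1 % M = q1) (B : Nat) (k : Nat) :
    (List.range k).foldl
      (fun (s : Int × Int × Int × Int) (_ : Nat) =>
        ((s.1 * (M + 1 - s.2.2.2)) % M, (s.2.1 * (M + 1 - s.2.2.1)) % M,
         (s.2.2.1 * q1) % M, (s.2.2.2 * q1) % M))
      (1, 1, q1, q1 ^ (B + 1) % M)
    = ((∏ i ∈ Finset.range k, (M + 1 - q1 ^ (B + 1 + i) % M)) % M,
       (∏ i ∈ Finset.range k, (M + 1 - q1 ^ (i + 1) % M)) % M,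
       q1 ^ (k + 1) % M, q1 ^ (B + 1 + k) % M) := by
  induction k with
  | zero =>
    have h1 : (1:Int) % M = 1 := Int.emod_eq_of_lt (by norm_num) (by omega)
    simp [h1, hq]
  | succ k ih =>
    rw [List.range_succ, List.foldl_append, ih]
    simp only [List.foldl_cons, List.foldl_nil]
    refine Prod.ext ?_ (Prod.ext ?_ (Prod.ext ?_ ?_)) <;> simp only []
    · rw [pv_mulmod_left, Finset.prod_range_succ]
    · rw [pv_mulmod_left, Finset.prod_range_succ]
    · rw [pv_mulmod_left, ← pow_succ]
    · rw [pv_mulmod_left, ← pow_succ]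
      have h : B + 1 + k + 1 = B + 1 + (k + 1) := by omega
      rw [h]

-- bridge: a mapped-range list product is the Finset.range product
theorem pv_prod_range (n : Nat) (f : Nat → Int) :
    ((List.range n).map f).prod = ∏ i ∈ Finset.range n, f i := rfl

theorem pv_pyRange_zero_nat (r' : Nat) :
    PySem.List.pyRange 0 (r' : Int) 1 = (List.range r').map (fun k : Nat => (k : Int)) := by
  rw [pv_pyRange_zero]
  norm_num

theorem pv_pyRange_one_nat (r' : Nat) (h : 0 < r') :
    PySem.List.pyRange 1 ((r' : Int) + 1) 1 = (List.range r').map (fun k : Nat => 1 + (k : Int)) := by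
  rw [pv_pyRange_one _ (by omega : (0:Int) < (r' : Int))]
  norm_num

-- two Ints are emod-equal when their casts into ZMod M.toNat agree
theorem pv_emod_eq_of_zmod (M : Int) (hM : 0 < M) (a b : Int)
    (h : ((a : ZMod M.toNat) = (b : ZMod M.toNat))) : a % M = b % M := by
  have h2 := (ZMod.intCast_eq_intCast_iff a b M.toNat).mp h
  have hMt : ((M.toNat : Nat) : Int) = M := by omega
  simpa [Int.ModEq, hMt] using h2

-- cast of x % M into ZMod M.toNat is the cast of x
theorem pv_cast_emod (M : Int) (hM : 0 < M) (x : Int) :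
    ((x % M : Int) : ZMod M.toNat) = (x : ZMod M.toNat) := by
  have h := ZMod.intCast_mod x M.toNat
  have hMt : ((M.toNat : Nat) : Int) = M := by omega
  rw [hMt] at h
  exact h

-- the modulus itself casts to 0
theorem pv_cast_M (M : Int) (hM : 0 < M) : ((M : Int) : ZMod M.toNat) = 0 := by
  have hMt : ((M.toNat : Nat) : Int) = M := by omega
  rw [← hMt]
  push_cast
  exact ZMod.natCast_self _

theorem pv_main_eq (m n q M : Int) (hpre : Pre_gaussian_binom m n q M) :
    gaussian_binom m n q M = gaussian_binom_alt m n q M := by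
  unfold gaussian_binom gaussian_binom_alt
  by_cases h1 : n < 0 ∨ m < n
  · rw [if_pos h1, if_pos h1]
  by_cases h2 : n = 0 ∨ n = m
  · rw [if_neg h1, if_pos h2, if_neg h1, if_pos h2]
  have hM : 2 ≤ M := by
    unfold Pre_gaussian_binom at hpre
    rcases hpre with h | h | h | h | h <;> first | exact h | exact absurd (by tauto) (by tauto)
  have hM0 : (0:Int) < M := by omega
  have hn1 : 1 ≤ n := by omega
  have hnm : n + 1 ≤ m := by omega
  rw [if_neg (by omega : ¬(n < 0 ∨ m < n)), if_neg (by tauto : ¬(n = 0 ∨ n = m))]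
  rw [if_neg (by omega : ¬(n < 0 ∨ m < n)), if_neg (by tauto : ¬(n = 0 ∨ n = m))]
  have hpow : ∀ (b : Int) (e : Nat), pyPowMod b e M = b ^ e % M :=
    fun b e => pyPowMod_eq b e M hM0
  simp only [hpow, PySem.Int.mod_eq_emod_of_pos hM0]
  have hq : q % M % M = q % M := Int.emod_emod_of_dvd _ dvd_rfl
  have hr1 : 1 ≤ min n (m - n) := by omega
  set r' : Nat := (min n (m - n)).toNat with hr'
  have hcast : min n (m - n) = ((r' : Nat) : Int) := by omega
  have hr'pos : 0 < r' := by omega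
  by_cases hq1 : q % M = 1
  · -- q == 1 branch
    rw [if_pos hq1, if_pos hq1]
    unfold binom_mod
    simp only [hpow, PySem.Int.mod_eq_emod_of_pos hM0]
    rw [if_neg (by omega : ¬(n < 0 ∨ m < n))]
    rw [if_neg (by omega : ¬(min n (m - n) = 0))]
    rw [hcast, pv_pyRange_one_nat _ hr'pos]
    rw [List.foldl_map, List.foldl_map]
    rw [pv_foldl_pair (fun a (y : Nat) => a * (m - (r' : Int) + (1 + (y : Int))) % M)
          (fun a (y : Nat) => a * (1 + (y : Int)) % M)]
    rw [pv_foldl_mulmod' M hM (fun y : Nat => m - (r' : Int) + (1 + (y : Int))),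
        pv_foldl_mulmod' M hM (fun y : Nat => (1 + (y : Int))),
        pv_foldl_mulmod2' M hM (fun y : Nat => m - (r' : Int) + (1 + (y : Int)))
          (fun y : Nat => (1 + (y : Int)) ^ (M - 2).toNat % M)]
    rw [pv_prod_range, pv_prod_range, pv_prod_range]
    dsimp only
    rw [Int.emod_emod_of_dvd _ dvd_rfl]
    refine pv_emod_eq_of_zmod M hM0 _ _ ?_
    simp only [Int.cast_mul, Int.cast_prod, Int.cast_pow, Int.cast_sub, Int.cast_add,
      Int.cast_one, pv_cast_emod M hM0]
    rw [Finset.prod_mul_distrib, Finset.prod_pow]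
  · -- generic q branch
    rw [if_neg hq1, if_neg hq1]
    rw [if_neg (by omega : ¬(min n (m - n) = 0))]
    rw [hcast]
    rw [show (m - ((r' : Nat) : Int) + 1).toNat = (m - ((r' : Nat) : Int)).toNat + 1 from by omega]
    set B : Nat := (m - ((r' : Nat) : Int)).toNat with hB
    rw [pv_pyRange_zero_nat, pv_pyRange_one_nat _ hr'pos]
    rw [List.foldl_map, List.foldl_map]
    rw [pv_A_loop M (q % M) hM hq B r']
    dsimp only
    have hbi : ∀ y : Nat, (m - ((r' : Nat) : Int) + (1 + (y : Int))).toNat = B + 1 + y := by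
      intro y; omega
    have hiy : ∀ y : Nat, (1 + (y : Int)).toNat = y + 1 := by
      intro y; omega
    simp only [hbi, hiy]
    rw [pv_foldl_mulmod2' M hM
          (fun y : Nat => 1 - (q % M) ^ (B + 1 + y) % M)
          (fun y : Nat => (1 - (q % M) ^ (y + 1) % M) ^ (M - 2).toNat % M)]
    rw [pv_prod_range]
    rw [Int.emod_emod_of_dvd _ dvd_rfl]
    refine pv_emod_eq_of_zmod M hM0 _ _ ?_
    simp only [Int.cast_mul, Int.cast_prod, Int.cast_pow, Int.cast_sub, Int.cast_add,
      Int.cast_one, pv_cast_emod M hM0, pv_cast_M M hM0]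
    rw [Finset.prod_mul_distrib, Finset.prod_pow]
    simp only [zero_add]

-- ===== VERDICT (by name: the statement is the Claim_ definition above) =====
theorem gaussian_binom_spec : Claim_equal_gaussian_binom := by
  intro m n q mod _ hpre
  unfold Spec_gaussian_binom
  exact pv_main_eq m n q mod hpre
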